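-- pv_equiv track=rewrite | github.com/joseporras00/3-MH | final/grafos-verTodos.py | evaluarNodos
-- ===== SOURCE A (Python) =====
-- def evaluarNodos(grafo, registro):
--     nodos1=grafo[0][1::]
--     nodos2=registro[::2]
--     cont=0
--     for i in range(len(nodos1)):
--         for j in range(len(nodos2)):
--             if(nodos1[i] == nodos2[j]):
--                 nodos2.pop(j)
--                 cont+=1
--                 break
--
--     if cont==len(nodos1):
--         return True
--     else:
--         return False
-- ===== SOURCE B (Python) =====
-- def evaluarNodos(grafo, registro):
--     # Multiset check: count registro's even-indexed nodes once,
--     # then consume a count per grafo node instead of scanning and popping.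
--     counts = {}
--     for v in registro[::2]:
--         counts[v] = counts.get(v, 0) + 1
--     for v in grafo[0][1:]:
--         c = counts.get(v, 0)
--         if c == 0:
--             return False
--         counts[v] = c - 1
--     return True
-- ===== Notes on version B (the rewrite author's own statement) =====
-- stated objective: alternative
-- what changed: Replaces A's nested scan-and-pop over the registro nodes with a dict counter built in one pass, so each grafo node is matched by a single lookup/decrement instead of scanning and popping a shrinking list.
import Mathlib
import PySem

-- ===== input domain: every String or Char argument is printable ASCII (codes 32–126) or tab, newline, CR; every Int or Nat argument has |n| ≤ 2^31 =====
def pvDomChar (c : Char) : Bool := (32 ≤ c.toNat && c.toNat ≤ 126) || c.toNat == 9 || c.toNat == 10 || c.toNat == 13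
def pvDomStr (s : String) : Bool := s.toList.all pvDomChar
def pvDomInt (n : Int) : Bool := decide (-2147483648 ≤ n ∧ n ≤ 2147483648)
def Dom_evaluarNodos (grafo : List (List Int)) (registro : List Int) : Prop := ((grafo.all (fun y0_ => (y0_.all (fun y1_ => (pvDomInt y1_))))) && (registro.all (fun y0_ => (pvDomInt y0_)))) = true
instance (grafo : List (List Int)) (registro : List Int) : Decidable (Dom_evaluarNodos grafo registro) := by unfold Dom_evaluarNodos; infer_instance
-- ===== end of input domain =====

-- B replaces A's nested scan-and-pop with a dict counter built in one pass (objective: alternative).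


-- ===== PORT A =====
-- inner 'for j in range(len(nodos2)): if nodos1[i]==nodos2[j]: nodos2.pop(j); break':
-- scan for the first equal element, pop it (none = no match, loop falls through).
def pvFindPop (x : Int) : List Int → Option (List Int)
  | [] => none
  | y :: ys => if x = y then some ys else (pvFindPop x ys).map (y :: ·)

-- outer 'for i in range(len(nodos1))' threading the mutable (nodos2, cont) state
def pvLoopA : List Int → List Int → Int → (List Int × Int)
  | [], nodos2, cont => (nodos2, cont)
  | x :: xs, nodos2, cont =>
    match pvFindPop x nodos2 with
    | some nodos2' => pvLoopA xs nodos2' (cont + 1)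
    | none => pvLoopA xs nodos2 cont

def evaluarNodos (grafo : List (List Int)) (registro : List Int) : Bool :=
  match PySem.List.pyGet? grafo 0 with
  | none => false   -- Python raises IndexError here; excluded by Pre_
  | some g0 =>
    let nodos1 := PySem.List.slice g0 (some 1) none
    let nodos2 := (PySem.List.slice? registro none none 2).getD []
    let cont := (pvLoopA nodos1 nodos2 0).2
    decide (cont = (nodos1.length : Int))

-- ===== PORT B =====
-- 'for v in grafo[0][1:]: c = counts.get(v,0); if c == 0: return False; counts[v] = c-1'
def pvLoopB : List Int → PySem.Dict Int Int → Bool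
  | [], _ => true
  | v :: vs, counts =>
    let c := counts.getD v 0
    if c = 0 then false
    else pvLoopB vs (counts.insert v (c - 1))

def evaluarNodos_alt (grafo : List (List Int)) (registro : List Int) : Bool :=
  match PySem.List.pyGet? grafo 0 with
  | none => false   -- Python raises IndexError here; excluded by Pre_
  | some g0 =>
    let counts := ((PySem.List.slice? registro none none 2).getD []).foldl
      (fun d v => d.insert v (d.getD v 0 + 1)) PySem.Dict.empty
    pvLoopB (PySem.List.slice g0 (some 1) none) counts

-- ===== PRECONDITION & SPEC =====
-- Pre_ excludes only grafo = [], on which Python A (and B) raises IndexError at grafo[0].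
def Pre_evaluarNodos (grafo : List (List Int)) (_registro : List Int) : Prop := grafo ≠ []
instance (grafo : List (List Int)) (registro : List Int) : Decidable (Pre_evaluarNodos grafo registro) := by unfold Pre_evaluarNodos; infer_instance
def pvWitness_evaluarNodos : List (List Int) × List Int := ([[9, 1, 2]], [1, 0, 2, 0])

def Spec_evaluarNodos (grafo : List (List Int)) (registro : List Int) (out : Bool) : Prop := out = evaluarNodos_alt grafo registro
instance (grafo : List (List Int)) (registro : List Int) (out : Bool) : Decidable (Spec_evaluarNodos grafo registro out) := by unfold Spec_evaluarNodos; infer_instance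

-- ===== CLAIM (what is proved, stated in full; the proofs are below) =====
def Claim_equal_evaluarNodos : Prop := ∀ (grafo : List (List Int)) (registro : List Int), Dom_evaluarNodos grafo registro → Pre_evaluarNodos grafo registro → Spec_evaluarNodos grafo registro (evaluarNodos grafo registro)

-- ===== LEMMAS AND PROOFS =====

-- pvFindPop finds something iff the element occurs
theorem pvFindPop_eq_none (x : Int) (l : List Int) : pvFindPop x l = none ↔ l.count x = 0 := by
  induction l with
  | nil => simp [pvFindPop]
  | cons y ys ih =>
    by_cases h : x = y
    · subst h; simp [pvFindPop]
    · simp only [pvFindPop, if_neg h, List.count_cons]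
      rcases hp : pvFindPop x ys with _ | l'
      · simp [ih.mp hp]
        exact Ne.symm h
      · have h2 : ¬ ys.count x = 0 := fun hc => by simp [ih.mpr hc] at hp
        simp only [Option.map_some, reduceCtorEq, false_iff]
        omega

-- popping x removes exactly one occurrence of x …
theorem pvFindPop_count_self (x : Int) (l l' : List Int) (h : pvFindPop x l = some l') :
    l.count x = l'.count x + 1 := by
  induction l generalizing l' with
  | nil => simp [pvFindPop] at h
  | cons y ys ih =>
    by_cases hx : x = y
    · simp only [pvFindPop, if_pos hx, Option.some.injEq] at h
      subst h
      simp [hx]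
    · simp only [pvFindPop, if_neg hx, Option.map_eq_some_iff] at h
      obtain ⟨m, hm, rfl⟩ := h
      simp [Ne.symm hx, ih m hm]

-- … and leaves every other multiplicity unchanged
theorem pvFindPop_count_other (x v : Int) (hvx : v ≠ x) (l l' : List Int)
    (h : pvFindPop x l = some l') : l'.count v = l.count v := by
  induction l generalizing l' with
  | nil => simp [pvFindPop] at h
  | cons y ys ih =>
    by_cases hx : x = y
    · simp only [pvFindPop, if_pos hx, Option.some.injEq] at h
      subst h
      have hyv : ¬ y = v := fun hh => hvx (by rw [← hh, hx])
      simp [hyv]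
    · simp only [pvFindPop, if_neg hx, Option.map_eq_some_iff] at h
      obtain ⟨m, hm, rfl⟩ := h
      simp [List.count_cons, ih m hm]

-- cont only grows by at most one per element
theorem pvLoopA_cont_le (xs m : List Int) (c : Int) : (pvLoopA xs m c).2 ≤ c + xs.length := by
  induction xs generalizing m c with
  | nil => simp [pvLoopA]
  | cons x xs ih =>
    cases hp : pvFindPop x m with
    | none => have := ih m c; simp only [pvLoopA, hp]; simp; omega
    | some m' => have := ih m' (c + 1); simp only [pvLoopA, hp]; simp; omega

-- main invariant: the counter dict tracks exactly the multiplicities of the remaining nodos2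
theorem pvLoop_equiv (xs : List Int) (m : List Int) (d : PySem.Dict Int Int) (c : Int)
    (hinv : ∀ v, d.getD v 0 = (m.count v : Int)) :
    (decide ((pvLoopA xs m c).2 = c + (xs.length : Int))) = pvLoopB xs d := by
  induction xs generalizing m d c with
  | nil => simp [pvLoopA, pvLoopB]
  | cons x xs ih =>
    cases hp : pvFindPop x m with
    | none =>
      have hc : m.count x = 0 := (pvFindPop_eq_none x m).mp hp
      have hd : d.getD x 0 = 0 := by rw [hinv x, hc]; rfl
      simp only [pvLoopA, pvLoopB, hp, if_pos hd]
      have hle := pvLoopA_cont_le xs m c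
      simp only [decide_eq_false_iff_not]
      intro heq
      simp only [List.length_cons] at heq
      push_cast at heq
      omega
    | some m' =>
      have hpos : 0 < m.count x := by
        by_contra h
        have h0 : m.count x = 0 := by omega
        rw [(pvFindPop_eq_none x m).mpr h0] at hp; simp at hp
      have hd : d.getD x 0 ≠ 0 := by rw [hinv x]; exact_mod_cast hpos.ne'
      simp only [pvLoopA, pvLoopB, hp, if_neg hd]
      have hinv' : ∀ v, (d.insert x (d.getD x 0 - 1)).getD v 0 = (m'.count v : Int) := by
        intro v
        rw [PySem.Dict.getD_insert]
        by_cases hv : v = x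
        · rw [if_pos hv, hv, hinv x]
          have := pvFindPop_count_self x m m' hp
          push_cast [this]
          ring
        · rw [if_neg hv, hinv v, pvFindPop_count_other x v hv m m' hp]
      simp only [List.length_cons]
      push_cast
      rw [show c + ((xs.length : Int) + 1) = c + 1 + (xs.length : Int) by ring]
      exact ih m' (d.insert x (d.getD x 0 - 1)) (c + 1) hinv'

-- B's counter-building fold adds each multiplicity onto the initial dict
theorem pvCounter_inv (l : List Int) (d : PySem.Dict Int Int) (v : Int) :
    (l.foldl (fun d v => d.insert v (d.getD v 0 + 1)) d).getD v 0
      = d.getD v 0 + (l.count v : Int) := by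
  induction l generalizing d with
  | nil => simp
  | cons x xs ih =>
    rw [List.foldl_cons, ih, PySem.Dict.getD_insert, List.count_cons]
    by_cases hv : v = x
    · subst hv
      rw [if_pos rfl]
      simp only [beq_self_eq_true, if_true]
      push_cast
      ring
    · rw [if_neg hv]
      have hbe : (x == v) = false := beq_eq_false_iff_ne.mpr (Ne.symm hv)
      simp only [hbe, Bool.false_eq_true, if_false]
      push_cast
      ring

-- ===== VERDICT (by name: the statement is the Claim_ definition above) =====
theorem evaluarNodos_spec : Claim_equal_evaluarNodos := by
  unfold Claim_equal_evaluarNodos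
  intro grafo registro _ hpre
  unfold Spec_evaluarNodos evaluarNodos evaluarNodos_alt
  cases grafo with
  | nil => exact absurd rfl hpre
  | cons g0 rest =>
    have hget : PySem.List.pyGet? (g0 :: rest) (0 : Int) = some g0 := by simp [PySem.List.pyGet?, PySem.List.pyIdx?]
    rw [hget]
    have hinv : ∀ v,
        (((PySem.List.slice? registro none none 2).getD []).foldl
          (fun d v => d.insert v (d.getD v 0 + 1)) PySem.Dict.empty).getD v 0
        = ((((PySem.List.slice? registro none none 2).getD []).count v : Int)) := by
      intro v
      rw [pvCounter_inv]
      simp [PySem.Dict.getD, PySem.Dict.empty, PySem.Dict.get?]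
    have h := pvLoop_equiv (PySem.List.slice g0 (some 1) none)
      ((PySem.List.slice? registro none none 2).getD []) _ 0 hinv
    simpa using h
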